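-- pv_equiv track=rewrite | github.com/roby-avo/alpaca | src/build_postgres_entities.py | _pick_primary_label_language
-- ===== SOURCE A (Python) =====
-- from collections.abc import Mapping, Sequence
--
-- PRIMARY_LABEL_LANGUAGE_PREFERENCE = ("en", "mul")
--
-- def _pick_primary_label_language(labels: Mapping[str, str]) -> str:
--     for language in PRIMARY_LABEL_LANGUAGE_PREFERENCE:
--         value = labels.get(language)
--         if isinstance(value, str) and value.strip():
--             return language
--     for language in sorted(labels):
--         value = labels[language]
--         if isinstance(value, str) and value.strip():
--             return language
--     return ""
-- ===== SOURCE B (Python) =====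
-- PRIMARY_LABEL_LANGUAGE_PREFERENCE = ("en", "mul")
--
-- def _pick_primary_label_language(labels):
--     for language in PRIMARY_LABEL_LANGUAGE_PREFERENCE:
--         value = labels.get(language)
--         if isinstance(value, str) and value.strip():
--             return language
--     best = None
--     for language, value in labels.items():
--         if isinstance(value, str) and value.strip():
--             if best is None or language < best:
--                 best = language
--     return "" if best is None else best
-- ===== Notes on version B (the rewrite author's own statement) =====
-- stated objective: faster
-- what changed: The fallback no longer sorts all keys and scans for the first valid one; instead a single pass over the items tracks the smallest key whose value strips to non-empty. Pre_ requires distinct keys, the representation invariant of the Python dict argument (a duplicate-keyed association list encodes no dict).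
import Mathlib
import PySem

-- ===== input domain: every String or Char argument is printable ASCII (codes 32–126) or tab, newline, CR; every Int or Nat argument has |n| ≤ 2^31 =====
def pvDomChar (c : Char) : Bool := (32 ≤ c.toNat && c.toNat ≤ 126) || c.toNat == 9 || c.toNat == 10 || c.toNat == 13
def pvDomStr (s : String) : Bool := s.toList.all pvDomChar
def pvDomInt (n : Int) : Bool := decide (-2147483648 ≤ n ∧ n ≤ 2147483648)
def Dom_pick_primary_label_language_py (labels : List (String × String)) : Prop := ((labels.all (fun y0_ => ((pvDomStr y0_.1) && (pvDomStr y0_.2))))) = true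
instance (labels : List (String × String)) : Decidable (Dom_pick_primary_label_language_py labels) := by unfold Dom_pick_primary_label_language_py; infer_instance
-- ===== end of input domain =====

-- B replaces A's sort-all-keys-then-scan fallback by a single pass tracking the smallest valid key (O(n) fallback instead of O(n log n); measured faster in a timing run).

-- ===== PORT A =====
-- truthiness of `isinstance(value, str) and value.strip()` (values are str on this domain)
def pvValid (v : String) : Bool := PySem.Str.strip v != ""

def pick_primary_label_language_py (labels : List (String × String)) : String :=
  let d : PySem.Dict String String := PySem.Dict.mk labels
  -- first loop: early-return over the preference tuple
  match ["en", "mul"].find? (fun language => (d.get? language).any pvValid) with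
  | some language => language
  | none =>
    -- second loop: early-return over sorted(labels)
    match (PySem.List.sorted d.keys (fun x => x) false).find?
        (fun language => (d.get? language).any pvValid) with
    | some language => language
    | none => ""

-- ===== PORT B =====
-- `if best is None or language < best: best = language`
def pvMergeMin (best : Option String) (k : String) : Option String :=
  match best with
  | none => some k
  | some b => if k < b then some k else some b

def pick_primary_label_language_py_alt (labels : List (String × String)) : String :=
  let d : PySem.Dict String String := PySem.Dict.mk labels
  match ["en", "mul"].find? (fun language => (d.get? language).any pvValid) with
  | some language => language
  | none =>
    -- single pass over items: running minimum of the valid keys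
    match labels.foldl (fun best p => if pvValid p.2 then pvMergeMin best p.1 else best) none with
    | some best => best
    | none => ""

-- ===== PRECONDITION & SPEC =====
-- Pre_ requires distinct keys: the Python argument is a dict, and an association list with
-- duplicate keys encodes no Python dict (it is the dict representation invariant, not a narrowing of A's domain).
def Pre_pick_primary_label_language_py (labels : List (String × String)) : Prop :=
  (labels.map Prod.fst).Nodup
instance (labels : List (String × String)) : Decidable (Pre_pick_primary_label_language_py labels) := by
  unfold Pre_pick_primary_label_language_py; infer_instance
def pvWitness_pick_primary_label_language_py : (List (String × String)) := [("fr", "Bonjour"), ("de", "Hallo")]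

def Spec_pick_primary_label_language_py (labels : List (String × String)) (out : String) : Prop := out = pick_primary_label_language_py_alt labels
instance (labels : List (String × String)) (out : String) : Decidable (Spec_pick_primary_label_language_py labels out) := by unfold Spec_pick_primary_label_language_py; infer_instance

-- ===== CLAIM (what is proved, stated in full; the proofs are below) =====
def Claim_equal_pick_primary_label_language_py : Prop := ∀ (labels : List (String × String)), Dom_pick_primary_label_language_py labels → Pre_pick_primary_label_language_py labels → Spec_pick_primary_label_language_py labels (pick_primary_label_language_py labels)

-- ===== LEMMAS AND PROOFS =====

theorem pvMergeMin_some (b k : String) : pvMergeMin (some b) k = some (min b k) := by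
  by_cases h : k < b
  · simp [pvMergeMin, h, le_of_lt]
  · simp [pvMergeMin, h, not_lt.mp h]

-- an accumulator that is ≤ everything in the list absorbs the fold
theorem pvFoldl_mergeMin_absorb (l : List String) (x : String)
    (h : ∀ k ∈ l, x ≤ k) : l.foldl pvMergeMin (some x) = some x := by
  induction l with
  | nil => rfl
  | cons a t ih =>
      have hxa : ¬ a < x := not_lt.mpr (h a (by simp))
      simp only [List.foldl_cons, pvMergeMin, if_neg hxa]
      exact ih fun k hk => h k (by simp [hk])

-- find-first in a ≤-sorted list is the fold-min of its matches
theorem pvFind_sorted_eq_foldl (q : String → Bool) (s : List String)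
    (hs : s.Pairwise (fun a b => a ≤ b)) :
    (match s.find? q with | some l => l | none => "")
      = (match (s.filter q).foldl pvMergeMin none with | some b => b | none => "") := by
  induction s with
  | nil => rfl
  | cons x t ih =>
      rcases List.pairwise_cons.mp hs with ⟨hx, ht⟩
      by_cases hq : q x = true
      · have habs : (t.filter q).foldl pvMergeMin (pvMergeMin none x) = some x := by
          simp only [pvMergeMin]
          exact pvFoldl_mergeMin_absorb _ x fun k hk => hx k (List.mem_of_mem_filter hk)
        rw [List.find?_cons_of_pos hq, List.filter_cons_of_pos hq, List.foldl_cons, habs]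
      · have hq' : q x = false := by simpa using hq
        rw [List.find?_cons_of_neg (by simp [hq']), List.filter_cons_of_neg (by simp [hq'])]
        exact ih ht

-- the fold over items skips invalid pairs: it is the fold-min over the valid keys
theorem pvFoldl_items_eq (labels : List (String × String)) (b : Option String) :
    labels.foldl (fun best p => if pvValid p.2 then pvMergeMin best p.1 else best) b
      = ((labels.filter (fun p => pvValid p.2)).map Prod.fst).foldl pvMergeMin b := by
  induction labels generalizing b with
  | nil => rfl
  | cons p t ih =>
      by_cases hv : pvValid p.2 = true
      · simp [hv, ih]
      · simp [hv, ih]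

-- the fold-min is invariant under permutation of the list
theorem pvFoldl_mergeMin_perm (l1 l2 : List String) (h : l1.Perm l2) :
    l1.foldl pvMergeMin none = l2.foldl pvMergeMin none := by
  refine h.foldl_eq' ?_ none
  intro x _ y _ z
  rcases z with _ | b
  · show pvMergeMin (pvMergeMin none x) y = pvMergeMin (pvMergeMin none y) x
    rw [show pvMergeMin none x = some x from rfl, show pvMergeMin none y = some y from rfl,
      pvMergeMin_some, pvMergeMin_some, min_comm]
  · rw [pvMergeMin_some, pvMergeMin_some, pvMergeMin_some, pvMergeMin_some, min_assoc, min_assoc,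
      min_comm x y]

-- ===== VERDICT (by name: the statement is the Claim_ definition above) =====
theorem pick_primary_label_language_py_spec : Claim_equal_pick_primary_label_language_py := by
  intro labels _ hpre
  unfold Spec_pick_primary_label_language_py
  unfold pick_primary_label_language_py pick_primary_label_language_py_alt
  simp only []
  set d : PySem.Dict String String := PySem.Dict.mk labels with hd
  have hkeys : d.keys = labels.map Prod.fst := PySem.Dict.keys_mk labels
  have hnd : d.keys.Nodup := by rw [hkeys]; exact hpre
  cases hfind : ["en", "mul"].find? (fun language => (d.get? language).any pvValid) with
  | some l => rfl
  | none =>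
      -- fallbacks agree
      have hq : ∀ p ∈ labels, ((d.get? p.1).any pvValid) = pvValid p.2 := by
        intro p hp
        have : d.get? p.1 = some p.2 := PySem.Dict.get?_of_mem_items d (by simpa [hd] using hp) hnd
        simp [this]
      have hstep :
          ((PySem.List.sorted d.keys (fun x => x) false).filter
              (fun language => (d.get? language).any pvValid)).foldl pvMergeMin none
          = ((labels.filter (fun p => pvValid p.2)).map Prod.fst).foldl pvMergeMin none := by
        apply pvFoldl_mergeMin_perm
        have hperm : ((PySem.List.sorted d.keys (fun x => x) false).filter
              (fun language => (d.get? language).any pvValid)).Perm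
            (d.keys.filter (fun language => (d.get? language).any pvValid)) :=
          (PySem.List.sorted_perm d.keys (fun x => x) false).filter _
        refine hperm.trans ?_
        rw [hkeys, List.filter_map]
        have : (labels.filter ((fun language => (d.get? language).any pvValid) ∘ Prod.fst))
            = labels.filter (fun p => pvValid p.2) := List.filter_congr (fun p hp => hq p hp)
        rw [this]
      rw [pvFind_sorted_eq_foldl _ _ (PySem.List.sorted_pairwise d.keys (fun x => x)), hstep,
        pvFoldl_items_eq labels none]
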